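-- pv_equiv track=rewrite | github.com/ankitkumar9018/AIDocumentIndexer | backend/services/pptx_chart_generator.py | _shorten_label
-- ===== SOURCE A (Python) =====
-- def _shorten_label(label: str, max_words: int = 3) -> str:
--     """Shorten a chart label by stripping trailing function words and truncating.
--
--     Examples:
--         "Biodiversity loss has accelerated by" -> "Biodiversity Loss"
--         "Ocean acidification has increased by" -> "Ocean Acidification"
--         "Soil moisture" -> "Soil Moisture" (unchanged)
--         "Total revenue for the quarter" -> "Total Revenue"
--     """
--     TRAILING_STOP = {
--         'has', 'have', 'had', 'by', 'of', 'the', 'is', 'are', 'was', 'were',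
--         'been', 'in', 'at', 'to', 'for', 'with', 'from', 'on', 'a', 'an',
--         'and', 'or', 'that', 'which', 'about', 'its', 'their', 'this',
--         'increased', 'decreased', 'accelerated', 'reached', 'reported',
--         'showed', 'experienced', 'affected', 'observed',
--     }
--     words = label.split()
--     if not words:
--         return label
--     # Strip trailing function words
--     while len(words) > 1 and words[-1].lower() in TRAILING_STOP:
--         words.pop()
--     # Truncate to max_words
--     words = words[:max_words]
--     # Second pass after truncation
--     while len(words) > 1 and words[-1].lower() in TRAILING_STOP:
--         words.pop()
--     # Title-case, preserving all-caps acronyms (GDP, CO2)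
--     return ' '.join(
--         w if (w.isupper() and len(w) >= 2) else w.capitalize()
--         for w in words
--     )
-- ===== SOURCE B (Python) =====
-- _STOP = frozenset({
--     'has', 'have', 'had', 'by', 'of', 'the', 'is', 'are', 'was', 'were',
--     'been', 'in', 'at', 'to', 'for', 'with', 'from', 'on', 'a', 'an',
--     'and', 'or', 'that', 'which', 'about', 'its', 'their', 'this',
--     'increased', 'decreased', 'accelerated', 'reached', 'reported',
--     'showed', 'experienced', 'affected', 'observed',
-- })
--
--
-- def _drop_stops(rev):
--     """Drop leading stop-words from a reversed word list, keeping at least one word."""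
--     if len(rev) > 1 and rev[0].lower() in _STOP:
--         return _drop_stops(rev[1:])
--     return rev
--
--
-- def _trim(words):
--     """Remove trailing stop-words (keeping at least one word)."""
--     return _drop_stops(words[::-1])[::-1]
--
--
-- def _title(w):
--     return w if w.isupper() and len(w) >= 2 else w.capitalize()
--
--
-- def _shorten_label(label: str, max_words: int = 3) -> str:
--     words = label.split()
--     if not words:
--         return label
--     kept = _trim(_trim(words)[:max_words])
--     return ' '.join(_title(w) for w in kept)
-- ===== Notes on version B (the rewrite author's own statement) =====
-- stated objective: simpler
-- what changed: A's two in-place pop-from-the-end while loops over a mutated list are replaced by a single recursive helper that reverses the word list and drops leading stop-words (keeping at least one), composed functionally as trim-truncate-trim with a named _title helper.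
import Mathlib
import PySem

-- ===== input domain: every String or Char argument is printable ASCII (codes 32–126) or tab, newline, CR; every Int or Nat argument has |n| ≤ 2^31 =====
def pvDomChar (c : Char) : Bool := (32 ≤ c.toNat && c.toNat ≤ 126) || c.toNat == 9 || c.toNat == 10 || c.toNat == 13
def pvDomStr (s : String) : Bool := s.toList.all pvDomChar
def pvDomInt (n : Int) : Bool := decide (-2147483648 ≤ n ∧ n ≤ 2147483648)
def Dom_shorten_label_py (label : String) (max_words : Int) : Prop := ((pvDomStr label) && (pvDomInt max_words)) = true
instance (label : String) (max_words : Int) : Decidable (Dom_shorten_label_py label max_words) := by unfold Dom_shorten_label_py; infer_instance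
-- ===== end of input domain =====

-- B replaces A's two in-place pop-from-the-end while loops by a recursive drop of
-- leading stop-words on the reversed list (one shared `_trim` helper), composed
-- functionally; objective: simpler/alternative decomposition, same exact values.

-- shared title-casing primitives (both Pythons compute exactly these, inline in A, as _title in B)
-- w.isupper() on ASCII: at least one letter and no lowercase letter (exact on Dom's ASCII strings)
def pvIsUpper (cs : List Char) : Bool :=
  cs.any PySem.Chars.isalpha && cs.all (fun c => ! PySem.Chars.islower c)

-- w.capitalize() on ASCII: first char uppercased, the rest lowercased (exact on Dom's ASCII strings)
def pvCapitalize : List Char → List Char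
  | [] => []
  | c :: rest => PySem.Chars.upperChar c :: rest.map PySem.Chars.lowerChar

def pvStopSet : PySem.Set String := PySem.Set.ofList
  ["has", "have", "had", "by", "of", "the", "is", "are", "was", "were",
   "been", "in", "at", "to", "for", "with", "from", "on", "a", "an",
   "and", "or", "that", "which", "about", "its", "their", "this",
   "increased", "decreased", "accelerated", "reached", "reported",
   "showed", "experienced", "affected", "observed"]

-- w.lower() in TRAILING_STOP
def pvIsStop (w : String) : Bool := PySem.Set.contains pvStopSet (PySem.Str.lower w)

-- ===== PORT A =====
-- A's while loop:  while len(words) > 1 and words[-1].lower() in TRAILING_STOP: words.pop()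
def stripPopA (ws : List String) : List String :=
  if _h : 1 < ws.length ∧ pvIsStop (((PySem.List.pyGet? ws (-1))).getD "") = true then
    stripPopA ws.dropLast
  else ws
termination_by ws.length
decreasing_by simp [List.length_dropLast]; omega

def shorten_label_py (label : String) (max_words : Int) : String :=
  let words := PySem.Str.split₀ label
  if words = [] then label
  else
    let words2 := stripPopA words                          -- first strip pass
    let words3 := PySem.List.slice words2 none (some max_words)   -- words[:max_words]
    let words4 := stripPopA words3                         -- second pass after truncation
    PySem.Str.join " "
      (words4.map (fun w =>
        if pvIsUpper w.toList && decide (2 ≤ PySem.Str.len w) then w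
        else String.ofList (pvCapitalize w.toList)))

-- ===== PORT B =====
-- Source B _drop_stops: drop leading stop-words of the reversed list, keeping at least one word
def dropStopsB : List String → List String
  | [] => []
  | w :: rest => if 0 < rest.length ∧ pvIsStop w = true then dropStopsB rest else w :: rest

-- Source B _trim
def trimB (ws : List String) : List String := (dropStopsB ws.reverse).reverse

-- Source B _title
def titleB (w : String) : String :=
  if pvIsUpper w.toList && decide (2 ≤ PySem.Str.len w) then w
  else String.ofList (pvCapitalize w.toList)

def shorten_label_py_alt (label : String) (max_words : Int) : String :=
  let words := PySem.Str.split₀ label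
  if words = [] then label
  else
    PySem.Str.join " "
      ((trimB (PySem.List.slice (trimB words) none (some max_words))).map titleB)

-- ===== PRECONDITION & SPEC =====
def Spec_shorten_label_py (label : String) (max_words : Int) (out : String) : Prop := out = shorten_label_py_alt label max_words
instance (label : String) (max_words : Int) (out : String) : Decidable (Spec_shorten_label_py label max_words out) := by unfold Spec_shorten_label_py; infer_instance

-- ===== CLAIM (what is proved, stated in full; the proofs are below) =====
def Claim_equal_shorten_label_py : Prop := ∀ (label : String) (max_words : Int), Dom_shorten_label_py label max_words → Spec_shorten_label_py label max_words (shorten_label_py label max_words)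

-- ===== LEMMAS AND PROOFS =====

-- A's pop-from-the-end loop computes exactly B's reverse/drop/reverse trim
theorem stripPopA_eq_trimB (ws : List String) : stripPopA ws = trimB ws := by
  induction ws using List.reverseRecOn with
  | nil => simp [stripPopA, trimB, dropStopsB]
  | append_singleton xs y ih =>
      rw [stripPopA]
      simp only [trimB, List.reverse_append, List.reverse_cons, List.reverse_nil,
        List.nil_append, List.cons_append, dropStopsB,
        PySem.List.pyGet?_neg_one_append_singleton, Option.getD_some,
        List.length_append, List.length_cons, List.length_nil,
        List.length_reverse, List.dropLast_concat]
      by_cases hs : pvIsStop y = true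
      · by_cases hl : 0 < xs.length
        · rw [dif_pos ⟨by omega, hs⟩, if_pos ⟨hl, hs⟩, ih, trimB]
        · have hx : xs = [] := List.eq_nil_of_length_eq_zero (by omega)
          subst hx
          rw [dif_neg (by simp), if_neg (by simp)]
          simp
      · rw [dif_neg (fun h => hs h.2), if_neg (fun h => hs h.2)]
        simp

-- ===== VERDICT (by name: the statement is the Claim_ definition above) =====
theorem shorten_label_py_spec : Claim_equal_shorten_label_py := by
  intro label max_words _
  show _ = _
  simp only [shorten_label_py, shorten_label_py_alt, stripPopA_eq_trimB]
  rfl
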